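-- pv_equiv track=rewrite | github.com/BitByteShark/AdventOfCode2025 | aoc_01_2024.py | part1
-- ===== SOURCE A (Python) =====
-- def part1(data):
--     instructions = list(data)
--     position = 50
--     password = 0
--     for instruction in instructions:
--         position += instruction
--         if position%100==0:
--             password += 1
--     return password
-- ===== SOURCE B (Python) =====
-- def part1(data):
--     def go(seg, start):
--         # divide and conquer: hits in seg given running position `start` before it
--         if not seg:
--             return 0
--         if len(seg) == 1:
--             return 1 if (start + seg[0]) % 100 == 0 else 0
--         m = len(seg) // 2
--         left, right = seg[:m], seg[m:]
--         return go(left, start) + go(right, start + sum(left))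
--     return go(list(data), 50)
-- ===== Notes on version B (the rewrite author's own statement) =====
-- stated objective: alternative
-- what changed: B counts hits by divide and conquer: it recursively splits the instruction list in half and counts multiples of 100 in the left half from the start offset and in the right half from start plus the left half's sum, instead of A's single fused left-to-right loop.
import Mathlib
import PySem

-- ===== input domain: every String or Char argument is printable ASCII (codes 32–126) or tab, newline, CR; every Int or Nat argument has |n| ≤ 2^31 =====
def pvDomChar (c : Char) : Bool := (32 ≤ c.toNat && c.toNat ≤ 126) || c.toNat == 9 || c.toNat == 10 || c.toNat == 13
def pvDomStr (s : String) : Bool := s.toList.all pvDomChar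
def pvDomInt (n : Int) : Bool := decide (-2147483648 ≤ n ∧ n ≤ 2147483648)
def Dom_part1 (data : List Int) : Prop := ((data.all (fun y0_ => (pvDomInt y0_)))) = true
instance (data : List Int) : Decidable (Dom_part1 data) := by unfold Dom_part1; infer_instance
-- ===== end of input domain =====

-- B counts by divide and conquer (split in half, offset the right half by the left
-- half's sum) instead of A's fused left-to-right loop; alternative decomposition.

-- ===== PORT A =====
-- A: single loop carrying (position, password); increment password when position % 100 == 0.
def part1 (data : List Int) : Int :=
  (data.foldl (fun (st : Int × Int) instruction =>
      let position := st.1 + instruction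
      if PySem.Int.mod position 100 == 0 then (position, st.2 + 1)
      else (position, st.2)) (50, 0)).2

-- ===== PORT B =====
-- B: recursive halving; sum(left) is Python's sum, ported as foldl (+) 0.
def part1_go (seg : List Int) (start : Int) : Int :=
  match seg with
  | [] => 0
  | [x] => if PySem.Int.mod (start + x) 100 == 0 then 1 else 0
  | a :: b :: rest =>
    let seg' := a :: b :: rest
    let m := seg'.length / 2
    part1_go (seg'.take m) start +
      part1_go (seg'.drop m) (start + (seg'.take m).foldl (· + ·) 0)
termination_by seg.length
decreasing_by
  all_goals simp [List.length_cons]; omega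

def part1_alt (data : List Int) : Int := part1_go data 50

-- ===== PRECONDITION & SPEC =====
def Spec_part1 (data : List Int) (out : Int) : Prop := out = part1_alt data
instance (data : List Int) (out : Int) : Decidable (Spec_part1 data out) := by unfold Spec_part1; infer_instance

-- ===== CLAIM (what is proved, stated in full; the proofs are below) =====
def Claim_equal_part1 : Prop := ∀ (data : List Int), Dom_part1 data → Spec_part1 data (part1 data)

-- ===== LEMMAS AND PROOFS =====

-- reference count: number of prefix positions hitting a multiple of 100
def pvCnt : List Int → Int → Int
  | [], _ => 0
  | d :: ds, pos => (if PySem.Int.mod (pos + d) 100 == 0 then 1 else 0) + pvCnt ds (pos + d)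

theorem pvCnt_foldlA (data : List Int) : ∀ (pos pwd : Int),
    (data.foldl (fun (st : Int × Int) instruction =>
        let position := st.1 + instruction
        if PySem.Int.mod position 100 == 0 then (position, st.2 + 1)
        else (position, st.2)) (pos, pwd)).2 = pwd + pvCnt data pos := by
  induction data with
  | nil => intro pos pwd; simp [pvCnt]
  | cons d ds ih =>
    intro pos pwd
    simp only [List.foldl_cons, pvCnt]
    split_ifs with h <;> rw [ih] <;> ring

theorem pvFoldl_add_shift (xs : List Int) : ∀ (a : Int),
    xs.foldl (· + ·) a = a + xs.foldl (· + ·) 0 := by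
  induction xs with
  | nil => intro a; simp
  | cons x xs ih =>
    intro a
    simp only [List.foldl_cons]
    rw [ih (a + x), ih (0 + x)]; omega

theorem pvCnt_append (xs : List Int) : ∀ (ys : List Int) (pos : Int),
    pvCnt (xs ++ ys) pos = pvCnt xs pos + pvCnt ys (pos + xs.foldl (· + ·) 0) := by
  induction xs with
  | nil => intro ys pos; simp [pvCnt]
  | cons x xs ih =>
    intro ys pos
    simp only [List.cons_append, pvCnt, List.foldl_cons, ih, zero_add]
    rw [pvFoldl_add_shift xs x, ← add_assoc]
    ring

theorem part1_go_eq_cnt (seg : List Int) (start : Int) :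
    part1_go seg start = pvCnt seg start := by
  induction seg, start using part1_go.induct with
  | case1 start => simp [part1_go, pvCnt]
  | case2 start x _ => simp [part1_go, pvCnt]
  | case3 start x _ => simp [part1_go, pvCnt]
  | case4 start a b rest seg0 m0 ih1 ih2 =>
    rw [part1_go]
    rw [ih1, ih2, ← pvCnt_append, List.take_append_drop]

-- ===== VERDICT (by name: the statement is the Claim_ definition above) =====
theorem part1_spec : Claim_equal_part1 := by
  intro data _
  unfold Spec_part1 part1 part1_alt
  rw [part1_go_eq_cnt, pvCnt_foldlA]
  omega
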